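-- pv_equiv track=rewrite | github.com/4Sighteducation/SubjectsandTopics | scrapers/Edexcel/International/language-scraper-template.py | _find_vocab_for_subtopic
-- ===== SOURCE A (Python) =====
-- from typing import List, Dict, Optional
--
-- def _find_vocab_for_subtopic(vocab_map: Dict, theme: str, subtopic: str) -> Optional[str]:
--     """Find relevant vocabulary for a subtopic."""
--     # Look for matching theme in vocab map
--     for key in vocab_map.keys():
--         if theme.lower() in key.lower():
--             # Found matching theme
--             theme_vocab = vocab_map[key]
--             if isinstance(theme_vocab, dict):
--                 # Look for matching subtopic
--                 for subkey, words in theme_vocab.items():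
--                     if any(word in subtopic.lower() for word in subkey.lower().split()):
--                         if isinstance(words, list) and len(words) > 0:
--                             return ", ".join(words[:10])  # Limit to 10 words
--                 # If no exact match, return first available
--                 for words in theme_vocab.values():
--                     if isinstance(words, list) and len(words) > 0:
--                         return ", ".join(words[:10])
--     return None
-- ===== SOURCE B (Python) =====
-- def _find_vocab_for_subtopic(vocab_map, theme, subtopic):
--     """Find relevant vocabulary for a subtopic (single inner pass with fallback)."""
--     theme_l = theme.lower()
--     sub_l = subtopic.lower()
--     for key in vocab_map:
--         if theme_l in key.lower():
--             theme_vocab = vocab_map[key]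
--             if isinstance(theme_vocab, dict):
--                 fallback = None
--                 for subkey, words in theme_vocab.items():
--                     if not (isinstance(words, list) and len(words) > 0):
--                         continue
--                     if fallback is None:
--                         fallback = words
--                     if any(w in sub_l for w in subkey.lower().split()):
--                         return ", ".join(words[:10])
--                 if fallback is not None:
--                     return ", ".join(fallback[:10])
--     return None
-- ===== Notes on version B (the rewrite author's own statement) =====
-- stated objective: simpler
-- what changed: The two inner passes over the theme dict (a match scan followed by a separate first-non-empty fallback scan) are fused into one pass that records the first non-empty word list in a fallback variable, and theme.lower()/subtopic.lower() are hoisted out of the loops instead of being recomputed per key and per word.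
import Mathlib
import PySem

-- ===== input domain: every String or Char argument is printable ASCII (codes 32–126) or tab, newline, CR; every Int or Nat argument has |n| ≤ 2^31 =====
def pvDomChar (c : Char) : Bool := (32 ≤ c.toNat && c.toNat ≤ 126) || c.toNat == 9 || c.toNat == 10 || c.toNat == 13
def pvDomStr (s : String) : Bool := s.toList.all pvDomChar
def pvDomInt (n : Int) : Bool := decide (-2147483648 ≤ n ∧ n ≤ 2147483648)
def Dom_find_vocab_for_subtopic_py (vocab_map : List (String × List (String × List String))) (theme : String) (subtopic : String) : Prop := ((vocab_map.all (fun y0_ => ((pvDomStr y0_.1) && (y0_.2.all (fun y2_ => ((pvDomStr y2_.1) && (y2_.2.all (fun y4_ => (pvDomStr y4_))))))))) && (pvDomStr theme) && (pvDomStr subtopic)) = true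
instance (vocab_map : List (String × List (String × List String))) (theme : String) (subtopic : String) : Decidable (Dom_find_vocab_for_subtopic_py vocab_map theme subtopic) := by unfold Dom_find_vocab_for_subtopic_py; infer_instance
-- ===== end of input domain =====

-- B fuses A's two inner passes (subkey-match scan, then first-non-empty fallback scan) into one
-- pass carrying a fallback variable; same return value, simpler control flow.
-- (The Python dict/list arguments arrive as association lists / lists, so A's isinstance guards
-- are always true under the type convention and are not ported as branches.)

-- ===== PORT A =====
-- first inner loop: for subkey, words in theme_vocab.items(): if any(word in subtopic.lower() ...): if len(words) > 0: return ", ".join(words[:10])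
def pvA_matchLoop (items : List (String × List String)) (subtopic : String) : Option String :=
  match items with
  | [] => none
  | (subkey, words) :: rest =>
    if (PySem.Str.split₀ (PySem.Str.lower subkey)).any
        (fun word => PySem.Str.isIn word (PySem.Str.lower subtopic)) then
      if words.length > 0 then
        some (PySem.Str.join ", " (PySem.List.slice words none (some 10)))
      else pvA_matchLoop rest subtopic
    else pvA_matchLoop rest subtopic

-- second inner loop: for words in theme_vocab.values(): if len(words) > 0: return ", ".join(words[:10])
def pvA_firstLoop (items : List (String × List String)) : Option String :=
  match items with
  | [] => none
  | (_, words) :: rest =>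
    if words.length > 0 then
      some (PySem.Str.join ", " (PySem.List.slice words none (some 10)))
    else pvA_firstLoop rest

def find_vocab_for_subtopic_py (vocab_map : List (String × List (String × List String))) (theme : String) (subtopic : String) : Option String :=
  match vocab_map with
  | [] => none
  | (key, theme_vocab) :: rest =>
    if PySem.Str.isIn (PySem.Str.lower theme) (PySem.Str.lower key) then
      match pvA_matchLoop theme_vocab subtopic with
      | some s => some s
      | none =>
        match pvA_firstLoop theme_vocab with
        | some s => some s
        | none => find_vocab_for_subtopic_py rest theme subtopic
    else find_vocab_for_subtopic_py rest theme subtopic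

-- ===== PORT B =====
-- single inner pass with a fallback variable (Source B's inner for-loop plus its trailing fallback return)
def pvB_scan (items : List (String × List String)) (sub_l : String) (fallback : Option (List String)) : Option String :=
  match items with
  | [] => fallback.map (fun ws => PySem.Str.join ", " (PySem.List.slice ws none (some 10)))
  | (subkey, words) :: rest =>
    if words.length > 0 then
      let fb := match fallback with | none => some words | some _ => fallback
      if (PySem.Str.split₀ (PySem.Str.lower subkey)).any (fun w => PySem.Str.isIn w sub_l) then
        some (PySem.Str.join ", " (PySem.List.slice words none (some 10)))
      else pvB_scan rest sub_l fb
    else pvB_scan rest sub_l fallback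

def pvB_outer (vocab_map : List (String × List (String × List String))) (theme_l : String) (sub_l : String) : Option String :=
  match vocab_map with
  | [] => none
  | (key, theme_vocab) :: rest =>
    if PySem.Str.isIn theme_l (PySem.Str.lower key) then
      match pvB_scan theme_vocab sub_l none with
      | some s => some s
      | none => pvB_outer rest theme_l sub_l
    else pvB_outer rest theme_l sub_l

def find_vocab_for_subtopic_py_alt (vocab_map : List (String × List (String × List String))) (theme : String) (subtopic : String) : Option String :=
  pvB_outer vocab_map (PySem.Str.lower theme) (PySem.Str.lower subtopic)

-- ===== PRECONDITION & SPEC =====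
def Spec_find_vocab_for_subtopic_py (vocab_map : List (String × List (String × List String))) (theme : String) (subtopic : String) (out : Option String) : Prop := out = find_vocab_for_subtopic_py_alt vocab_map theme subtopic
instance (vocab_map : List (String × List (String × List String))) (theme : String) (subtopic : String) (out : Option String) : Decidable (Spec_find_vocab_for_subtopic_py vocab_map theme subtopic out) := by unfold Spec_find_vocab_for_subtopic_py; infer_instance

-- ===== CLAIM (what is proved, stated in full; the proofs are below) =====
def Claim_equal_find_vocab_for_subtopic_py : Prop := ∀ (vocab_map : List (String × List (String × List String))) (theme : String) (subtopic : String), Dom_find_vocab_for_subtopic_py vocab_map theme subtopic → Spec_find_vocab_for_subtopic_py vocab_map theme subtopic (find_vocab_for_subtopic_py vocab_map theme subtopic)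

-- ===== LEMMAS AND PROOFS =====

-- B's single scan with fallback fb equals A's match pass, else fb (already set from earlier items),
-- else A's fallback pass over the remaining items.
theorem pvB_scan_eq (subtopic : String) :
    ∀ (items : List (String × List String)) (fb : Option (List String)),
      pvB_scan items (PySem.Str.lower subtopic) fb =
        match pvA_matchLoop items subtopic with
        | some s => some s
        | none =>
          match fb with
          | some ws => some (PySem.Str.join ", " (PySem.List.slice ws none (some 10)))
          | none => pvA_firstLoop items := by
  intro items
  induction items with
  | nil => intro fb; cases fb <;> simp [pvB_scan, pvA_matchLoop, pvA_firstLoop]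
  | cons hd rest ih =>
    intro fb
    obtain ⟨subkey, words⟩ := hd
    by_cases hlen : words.length > 0 <;>
      by_cases hmatch : ((PySem.Str.split₀ (PySem.Str.lower subkey)).any
        (fun w => PySem.Str.isIn w (PySem.Str.lower subtopic)) = true) <;>
      cases fb <;>
      simp [pvB_scan, pvA_matchLoop, pvA_firstLoop, hlen, ih] <;>
      split_ifs <;> rfl

theorem pvOuter_eq (theme subtopic : String) :
    ∀ (vocab_map : List (String × List (String × List String))),
      find_vocab_for_subtopic_py vocab_map theme subtopic =
        pvB_outer vocab_map (PySem.Str.lower theme) (PySem.Str.lower subtopic) := by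
  intro vocab_map
  induction vocab_map with
  | nil => simp [find_vocab_for_subtopic_py, pvB_outer]
  | cons hd rest ih =>
    obtain ⟨key, theme_vocab⟩ := hd
    by_cases hkey : (PySem.Str.isIn (PySem.Str.lower theme) (PySem.Str.lower key) = true) <;>
      simp only [find_vocab_for_subtopic_py, pvB_outer, hkey, if_true,
        pvB_scan_eq subtopic theme_vocab none, ih] <;>
      cases pvA_matchLoop theme_vocab subtopic <;>
      cases pvA_firstLoop theme_vocab <;> simp

-- ===== VERDICT (by name: the statement is the Claim_ definition above) =====
theorem find_vocab_for_subtopic_py_spec : Claim_equal_find_vocab_for_subtopic_py := by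
  intro vocab_map theme subtopic _
  unfold Spec_find_vocab_for_subtopic_py find_vocab_for_subtopic_py_alt
  exact pvOuter_eq theme subtopic vocab_map
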